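-- pv_equiv track=rewrite | github.com/yashitanamdeo/geeks-for-geeks | Medium/best_node/solution.py | bestNode
-- ===== SOURCE A (Python) =====
-- from typing import List
--
-- def bestNode(N: int, A: List[int], P: List[int]) -> int:
--     def _solve(ix):
--         if cs[ix]:
--             for c in cs[ix]:
--                 _solve(c)
--             dp[ix] = max(A[ix] - A[i] + cmax[i] for i in cs[ix])
--             cmax[ix] = max(dp[i] for i in cs[ix])
--         else:
--             dp[ix] = A[ix]
--             cmax[ix] = 0
--
--     cs = [[] for _ in range(N)]
--     dp, cmax = [0] * N, [0] * N
--     for i in range(1, N):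
--         cs[P[i]-1].append(i)
--     _solve(0)
--     return max(dp)
-- ===== SOURCE B (Python) =====
-- from typing import List
--
-- def bestNode(N: int, A: List[int], P: List[int]) -> int:
--     # Iterative version: children lists, then an explicit BFS order from node 0,
--     # then one reverse sweep so every node is handled after all of its children.
--     cs = [[] for _ in range(N)]
--     for i in range(1, N):
--         cs[P[i] - 1].append(i)
--     order = [0]
--     for v in order:          # BFS: 'order' doubles as the queue
--         order.extend(cs[v])
--     dp, cmax = [0] * N, [0] * N
--     for v in reversed(order):
--         if cs[v]:
--             dp[v] = max(A[v] - A[c] + cmax[c] for c in cs[v])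
--             cmax[v] = max(dp[c] for c in cs[v])
--         else:
--             dp[v] = A[v]
--             cmax[v] = 0
--     return max(dp)
-- ===== Notes on version B (the rewrite author's own statement) =====
-- stated objective: alternative
-- what changed: Replaces the recursive DFS post-order (_solve) by an explicit BFS order list from node 0 plus a single reverse sweep over that list, so the DP is computed iteratively with no recursion.
import Mathlib
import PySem

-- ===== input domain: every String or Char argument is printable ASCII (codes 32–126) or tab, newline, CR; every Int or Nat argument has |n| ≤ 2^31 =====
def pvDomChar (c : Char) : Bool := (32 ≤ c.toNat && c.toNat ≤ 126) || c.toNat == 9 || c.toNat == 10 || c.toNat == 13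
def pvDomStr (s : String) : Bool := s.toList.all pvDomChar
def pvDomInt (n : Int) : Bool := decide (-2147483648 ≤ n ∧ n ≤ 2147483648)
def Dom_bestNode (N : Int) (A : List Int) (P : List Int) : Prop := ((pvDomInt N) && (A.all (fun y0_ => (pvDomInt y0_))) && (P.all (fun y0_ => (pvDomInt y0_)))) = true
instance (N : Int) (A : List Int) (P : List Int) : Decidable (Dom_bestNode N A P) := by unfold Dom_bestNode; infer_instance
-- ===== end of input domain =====

-- B replaces A's recursive DFS by an explicit BFS order plus one reverse sweep (iterative, same cost).

-- ===== PORT A =====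

-- Python max(l) for nonempty l (max([]) raises ValueError; Pre_ gives N ≥ 1 so l ≠ [] here)
def pyMax (l : List Int) : Int :=
  match l with
  | [] => 0
  | x :: xs => xs.foldl max x

-- Python negative-index normalization for list subscripts
def pvNorm (len : Nat) (j : Int) : Int := if j < 0 then j + len else j

-- cs[j].append(v); exact for -len ≤ j < len (Python raises IndexError otherwise; excluded by Pre_)
def pvAppendAt (cs : List (List Int)) (j : Int) (v : Int) : List (List Int) :=
  let k := pvNorm cs.length j
  if 0 ≤ k ∧ k < (cs.length : Int) then cs.set k.toNat (cs.getD k.toNat [] ++ [v]) else cs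

-- cs = [[] for _ in range(N)]; for i in range(1, N): cs[P[i]-1].append(i)
def buildCs (N : Int) (P : List Int) : List (List Int) :=
  (PySem.List.pyRange 1 N 1).foldl
    (fun cs i => pvAppendAt cs (PySem.List.pyGetD P i 0 - 1) i)
    (List.replicate N.toNat [])

-- _solve, with fuel: Python's recursion is unbounded; on Pre_ the recursion depth is ≤ N,
-- so fuel N.toNat makes this exact there. Branch order as in Python (if cs[ix]: … else: …).
def solveA (A : List Int) (cs : List (List Int)) : Nat → Nat → List Int × List Int → List Int × List Int
  | 0, _, st => st
  | f+1, ix, st =>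
      if cs.getD ix [] ≠ [] then
        let st1 := (cs.getD ix []).foldl (fun s c => solveA A cs f c.toNat s) st
        let dp2 := st1.1.set ix (pyMax ((cs.getD ix []).map (fun c => A.getD ix 0 - A.getD c.toNat 0 + st1.2.getD c.toNat 0)))
        let cm2 := st1.2.set ix (pyMax ((cs.getD ix []).map (fun c => dp2.getD c.toNat 0)))
        (dp2, cm2)
      else
        (st.1.set ix (A.getD ix 0), st.2.set ix 0)

def bestNode (N : Int) (A : List Int) (P : List Int) : Int :=
  let cs := buildCs N P
  let st := solveA A cs N.toNat 0 (List.replicate N.toNat 0, List.replicate N.toNat 0)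
  pyMax st.1

-- ===== PORT B =====

-- order = [0]; for v in order: order.extend(cs[v])  — pointer i walks the growing list.
-- Fuel N.toNat: the loop body runs once per final element, and |order| ≤ N on Pre_ (elements distinct).
def bfsLoop (cs : List (List Int)) : Nat → Nat → List Int → List Int
  | 0, _, order => order
  | f+1, i, order =>
      if i < order.length then
        bfsLoop cs f (i+1) (order ++ cs.getD (order.getD i 0).toNat [])
      else order

-- body of "for v in reversed(order): …" (ix = v, ch = cs[v])
def sweepStep (A : List Int) (cs : List (List Int)) (st : List Int × List Int) (v : Int) : List Int × List Int :=
  if cs.getD v.toNat [] ≠ [] then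
    let dp2 := st.1.set v.toNat (pyMax ((cs.getD v.toNat []).map (fun c => A.getD v.toNat 0 - A.getD c.toNat 0 + st.2.getD c.toNat 0)))
    let cm2 := st.2.set v.toNat (pyMax ((cs.getD v.toNat []).map (fun c => dp2.getD c.toNat 0)))
    (dp2, cm2)
  else
    (st.1.set v.toNat (A.getD v.toNat 0), st.2.set v.toNat 0)

def bestNode_alt (N : Int) (A : List Int) (P : List Int) : Int :=
  let cs := buildCs N P
  let order := bfsLoop cs N.toNat 0 [0]
  let st := order.reverse.foldl (sweepStep A cs) (List.replicate N.toNat 0, List.replicate N.toNat 0)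
  pyMax st.1

-- ===== PRECONDITION & SPEC =====
-- Pre_ = the inputs where the Python A returns normally: N ≥ 1 (else max([]) / cs[0]
-- raise), A long enough for every node index (A[ix] would raise IndexError), every read
-- P[j] present, and every parent subscript P[j]-1 in Python range [-N, N) (else
-- cs[P[j]-1] raises IndexError). N ≤ len(A) is slightly stronger than needed: when some
-- nodes are unreachable from node 0, A reads only the reachable indices of A.
-- (Python's finite recursion limit on extremely deep trees is not modeled.)
def Pre_bestNode (N : Int) (A : List Int) (P : List Int) : Prop :=
  1 ≤ N ∧ N.toNat ≤ A.length ∧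
  ∀ j : Nat, j < N.toNat → 1 ≤ j → j < P.length ∧ 1 - N ≤ P.getD j 0 ∧ P.getD j 0 ≤ N

instance (N : Int) (A : List Int) (P : List Int) : Decidable (Pre_bestNode N A P) := by
  unfold Pre_bestNode; infer_instance

def pvWitness_bestNode : Int × List Int × List Int := (3, ([1, 5, 2], [0, 1, 1]))

def Spec_bestNode (N : Int) (A : List Int) (P : List Int) (out : Int) : Prop := out = bestNode_alt N A P
instance (N : Int) (A : List Int) (P : List Int) (out : Int) : Decidable (Spec_bestNode N A P out) := by
  unfold Spec_bestNode; infer_instance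

-- ===== CLAIM (what is proved, stated in full; the proofs are below) =====
def Claim_equal_bestNode : Prop := ∀ (N : Int) (A : List Int) (P : List Int), Dom_bestNode N A P → Pre_bestNode N A P → Spec_bestNode N A P (bestNode N A P)

-- ===== LEMMAS AND PROOFS =====

-- j ∈ descendants of a in the children graph cs
inductive DescR (cs : List (List Int)) : Nat → Nat → Prop
  | refl (a : Nat) : DescR cs a a
  | step {a v : Nat} (c : Int) : DescR cs a v → c ∈ cs.getD v [] → DescR cs a c.toNat

-- getD through set
theorem pv_getD_set_self {α : Type} (l : List α) (k : Nat) (h : k < l.length) (v d : α) :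
    (l.set k v).getD k d = v := by
  rw [List.getD_eq_getElem?_getD, List.getElem?_set_self (by simpa using h)]
  rfl

theorem pv_getD_set_ne {α : Type} (l : List α) (k j : Nat) (hne : j ≠ k) (v d : α) :
    (l.set k v).getD j d = l.getD j d := by
  rw [List.getD_eq_getElem?_getD, List.getElem?_set_ne (by omega), ← List.getD_eq_getElem?_getD]

-- invariant of the built children lists: entries are ints in [1, m), each list Nodup,
-- a value occurs in at most one list
def CsInv (n : Nat) (m : Int) (cs : List (List Int)) : Prop :=
  cs.length = n ∧
  (∀ p : Nat, ∀ c ∈ cs.getD p [], 1 ≤ c ∧ c < m) ∧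
  (∀ p : Nat, (cs.getD p []).Nodup) ∧
  (∀ p q : Nat, ∀ c : Int, c ∈ cs.getD p [] → c ∈ cs.getD q [] → p = q)

theorem pvAppendAt_inv {n : Nat} {m : Int} {cs : List (List Int)} (hm : 1 ≤ m)
    (h : CsInv n m cs) (j : Int) : CsInv n (m+1) (pvAppendAt cs j m) := by
  obtain ⟨hlen, hbnd, hnd, hdisj⟩ := h
  unfold pvAppendAt
  simp only []
  split
  · rename_i hin
    set k := (pvNorm cs.length j).toNat with hk
    have hklen : k < cs.length := by
      have := hin.2; have := hin.1; omega
    have hget : ∀ p : Nat, (cs.set k (cs.getD k [] ++ [m])).getD p [] =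
        if p = k then cs.getD k [] ++ [m] else cs.getD p [] := by
      intro p
      by_cases hp : p = k
      · subst hp; rw [pv_getD_set_self _ _ hklen]; simp
      · rw [pv_getD_set_ne _ _ _ hp]; simp [hp]
    refine ⟨by simpa using hlen, ?_, ?_, ?_⟩
    · intro p c hc
      rw [hget p] at hc
      by_cases hp : p = k
      · simp [hp] at hc
        rcases hc with hc | rfl
        · have := hbnd k c hc; omega
        · omega
      · simp [hp] at hc
        have := hbnd p c hc; omega
    · intro p
      rw [hget p]
      by_cases hp : p = k
      · rw [if_pos hp]
        rw [List.nodup_append]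
        refine ⟨hnd k, List.nodup_singleton m, ?_⟩
        intro a ha b hb
        simp at hb; subst hb
        have := hbnd k a ha; omega
      · rw [if_neg hp]; exact hnd p
    · intro p q c hcp hcq
      rw [hget p] at hcp; rw [hget q] at hcq
      by_cases hp : p = k <;> by_cases hq : q = k
      · omega
      · simp [hp, hq] at hcp hcq
        rcases hcp with hcp | rfl
        · exact absurd (hdisj p q c (hp ▸ hcp) hcq) (by omega)
        · have := hbnd q c hcq; omega
      · simp [hp, hq] at hcp hcq
        rcases hcq with hcq | rfl
        · exact absurd (hdisj p q c hcp (hq ▸ hcq)) (by omega)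
        · have := hbnd p c hcp; omega
      · simp [hp, hq] at hcp hcq
        exact hdisj p q c hcp hcq
  · exact ⟨hlen, fun p c hc => by have := hbnd p c hc; omega, hnd, hdisj⟩

theorem buildCs_aux {n : Nat} {P : List Int} :
    ∀ (b : Int) (a : Int) (cs : List (List Int)), 1 ≤ a → a ≤ b → CsInv n a cs →
      CsInv n b ((PySem.List.pyRange a b 1).foldl
        (fun cs i => pvAppendAt cs (PySem.List.pyGetD P i 0 - 1) i) cs) := by
  intro b a
  induction hd : (b - a).toNat generalizing a with
  | zero =>
      intro cs h1 hab hinv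
      have hba : b ≤ a := by omega
      have hba' : b = a := le_antisymm hba hab
      rw [PySem.List.pyRange_one_eq_nil hba]
      simpa [hba'] using hinv
  | succ d ih =>
      intro cs h1 hab hinv
      have hlt : a < b := by omega
      rw [PySem.List.pyRange_one_cons hlt]
      simp only [List.foldl_cons]
      exact ih (a + 1) (by omega) _ (by omega) (by omega)
        (pvAppendAt_inv h1 hinv _)

theorem buildCs_inv {N : Int} {P : List Int} (hN : 1 ≤ N) :
    CsInv N.toNat N (buildCs N P) := by
  unfold buildCs
  refine buildCs_aux N 1 _ le_rfl hN ?_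
  refine ⟨by simp, ?_, ?_, ?_⟩
  · intro p c hc
    rcases Nat.lt_or_ge p N.toNat with hp | hp
    · rw [List.getD_eq_getElem _ _ (by simpa using hp)] at hc
      simp at hc
    · rw [List.getD_eq_default _ _ (by simpa using hp)] at hc
      simp at hc
  · intro p
    rcases Nat.lt_or_ge p N.toNat with hp | hp
    · rw [List.getD_eq_getElem _ _ (by simpa using hp)]; simp
    · rw [List.getD_eq_default _ _ (by simpa using hp)]; simp
  · intro p q c hcp hcq
    exfalso
    rcases Nat.lt_or_ge p N.toNat with hp | hp
    · rw [List.getD_eq_getElem _ _ (by simpa using hp)] at hcp; simp at hcp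
    · rw [List.getD_eq_default _ _ (by simpa using hp)] at hcp; simp at hcp

-- BFS loop invariant
def BfsInv (n : Nat) (cs : List (List Int)) (i : Nat) (o : List Int) : Prop :=
  i ≤ o.length ∧ o.Nodup ∧ o ≠ [] ∧ o.getD 0 0 = 0 ∧
  (∀ v ∈ o, 0 ≤ v ∧ v.toNat < n ∧ DescR cs 0 v.toNat ∧
    (v = 0 ∨ ∃ p : Nat, p < i ∧ v ∈ cs.getD (o.getD p 0).toNat [])) ∧
  (∀ k : Nat, k < i → ∀ c ∈ cs.getD (o.getD k 0).toNat [], ∃ j : Nat, k < j ∧ j < o.length ∧ o.getD j 0 = c)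

theorem pv_nodup_getD_inj {o : List Int} (hnd : o.Nodup) {p q : Nat}
    (hp : p < o.length) (hq : q < o.length) (h : o.getD p 0 = o.getD q 0) : p = q := by
  rw [List.getD_eq_getElem _ _ hp, List.getD_eq_getElem _ _ hq] at h
  exact (List.Nodup.getElem_inj_iff hnd).1 h

theorem pv_length_le {n : Nat} {o : List Int} (hnd : o.Nodup)
    (hv : ∀ v ∈ o, 0 ≤ v ∧ v.toNat < n) : o.length ≤ n := by
  have hndm : (o.map Int.toNat).Nodup := by
    refine List.Nodup.map_on ?_ hnd
    intro x hx y hy hxy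
    have hx0 := (hv x hx).1; have hy0 := (hv y hy).1
    omega
  have hsub : (o.map Int.toNat).toFinset ⊆ Finset.range n := by
    intro x hx
    simp only [List.mem_toFinset, List.mem_map] at hx
    obtain ⟨v, hv', rfl⟩ := hx
    simpa using (hv v hv').2
  have hcard := Finset.card_le_card hsub
  rw [List.toFinset_card_of_nodup hndm, Finset.card_range] at hcard
  simpa using hcard

theorem pv_getD_append_left {α : Type} (o l : List α) (p : Nat) (hp : p < o.length) (d : α) :
    (o ++ l).getD p d = o.getD p d := by
  rw [List.getD_eq_getElem?_getD, List.getElem?_append_left hp, ← List.getD_eq_getElem?_getD]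

theorem pv_getD_append_right {α : Type} (o l : List α) (k : Nat) (d : α) :
    (o ++ l).getD (o.length + k) d = l.getD k d := by
  rw [List.getD_eq_getElem?_getD, List.getElem?_append_right (by omega),
    ← List.getD_eq_getElem?_getD]
  congr 1
  omega

theorem pv_getD_mem {α : Type} (o : List α) (p : Nat) (hp : p < o.length) (d : α) :
    o.getD p d ∈ o := by
  rw [List.getD_eq_getElem _ _ hp]
  exact List.getElem_mem _

theorem bfs_step {n : Nat} {cs : List (List Int)} {i : Nat} {o : List Int}
    (hval : ∀ p : Nat, ∀ c ∈ cs.getD p [], 1 ≤ c ∧ c.toNat < n)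
    (hnd : ∀ p : Nat, (cs.getD p []).Nodup)
    (hdisj : ∀ p q : Nat, ∀ c : Int, c ∈ cs.getD p [] → c ∈ cs.getD q [] → p = q)
    (h : BfsInv n cs i o) (hi : i < o.length) :
    BfsInv n cs (i+1) (o ++ cs.getD (o.getD i 0).toNat []) := by
  obtain ⟨hil, hond, hne, h0, hmem, hposn⟩ := h
  set v := o.getD i 0 with hv
  set l := cs.getD v.toNat [] with hl
  have hvmem : v ∈ o := pv_getD_mem o i hi 0
  have hnotin : ∀ c ∈ l, c ∉ o := by
    intro c hc hco
    obtain ⟨_, _, _, horig⟩ := hmem c hco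
    rcases horig with rfl | ⟨p, hpi, hp⟩
    · have := (hval _ _ hc).1; omega
    · have heq := hdisj _ _ c hp hc
      have hp0 : (0:Int) ≤ o.getD p 0 := (hmem _ (pv_getD_mem o p (by omega) 0)).1
      have hv0 : (0:Int) ≤ v := (hmem v hvmem).1
      have : o.getD p 0 = v := by omega
      exact absurd (pv_nodup_getD_inj hond (by omega) hi this) (by omega)
  refine ⟨?_, ?_, ?_, ?_, ?_, ?_⟩
  · simp; omega
  · rw [List.nodup_append]
    exact ⟨hond, hnd _, fun a ha b hb => fun hab => hnotin b hb (hab ▸ ha)⟩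
  · simp [hne]
  · rw [pv_getD_append_left _ _ _ (by cases o with | nil => exact (hne rfl).elim | cons => simp) _]
    exact h0
  · intro w hw
    rcases List.mem_append.1 hw with hw | hw
    · obtain ⟨h1, h2, h3, h4⟩ := hmem w hw
      refine ⟨h1, h2, h3, ?_⟩
      rcases h4 with rfl | ⟨p, hpi, hp⟩
      · exact Or.inl rfl
      · exact Or.inr ⟨p, by omega, by rwa [pv_getD_append_left _ _ _ (by omega) _]⟩
    · have hb := hval _ w hw
      obtain ⟨_, _, hdesc, _⟩ := hmem v hvmem
      refine ⟨by omega, hb.2, DescR.step w hdesc hw, ?_⟩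
      exact Or.inr ⟨i, by omega, by rwa [pv_getD_append_left _ _ _ hi _]⟩
  · intro k hk c hc
    rcases Nat.lt_or_ge k i with hki | hki
    · rw [pv_getD_append_left _ _ _ (by omega) _] at hc
      obtain ⟨j, hj1, hj2, hj3⟩ := hposn k hki c hc
      exact ⟨j, hj1, by simp; omega, by rw [pv_getD_append_left _ _ _ hj2 _]; exact hj3⟩
    · have hki' : k = i := by omega
      subst hki'
      rw [pv_getD_append_left _ _ _ hi _] at hc
      obtain ⟨q, hq, hq2⟩ := List.getElem_of_mem hc
      refine ⟨o.length + q, by omega, by simp; omega, ?_⟩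
      rw [pv_getD_append_right, List.getD_eq_getElem _ _ hq]
      exact hq2

theorem bfs_run {n : Nat} {cs : List (List Int)}
    (hval : ∀ p : Nat, ∀ c ∈ cs.getD p [], 1 ≤ c ∧ c.toNat < n)
    (hnd : ∀ p : Nat, (cs.getD p []).Nodup)
    (hdisj : ∀ p q : Nat, ∀ c : Int, c ∈ cs.getD p [] → c ∈ cs.getD q [] → p = q) :
    ∀ (f i : Nat) (o : List Int), BfsInv n cs i o → n - i ≤ f →
      BfsInv n cs (bfsLoop cs f i o).length (bfsLoop cs f i o) ∧ (bfsLoop cs f i o).length ≤ n := by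
  intro f
  induction f with
  | zero =>
      intro i o hinv hf
      have hlen : o.length ≤ n := pv_length_le hinv.2.1 (fun v hv => ⟨(hinv.2.2.2.2.1 v hv).1, (hinv.2.2.2.2.1 v hv).2.1⟩)
      have : i = o.length := by have := hinv.1; omega
      subst this
      exact ⟨by simpa [bfsLoop] using hinv, by simpa [bfsLoop] using hlen⟩
  | succ f ih =>
      intro i o hinv hf
      rw [bfsLoop]
      split
      · rename_i hi
        exact ih (i+1) _ (bfs_step hval hnd hdisj hinv hi) (by omega)
      · rename_i hi
        have hlen : o.length ≤ n := pv_length_le hinv.2.1 (fun v hv => ⟨(hinv.2.2.2.2.1 v hv).1, (hinv.2.2.2.2.1 v hv).2.1⟩)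
        have : i = o.length := by have := hinv.1; omega
        subst this
        exact ⟨hinv, hlen⟩

-- every node of s is followed (within s) by all of its children
def ChildrenLater (cs : List (List Int)) : List Int → Prop
  | [] => True
  | v :: s => (∀ c ∈ cs.getD v.toNat [], c ∈ s) ∧ ChildrenLater cs s

theorem posCL {cs : List (List Int)} :
    ∀ (o : List Int),
      (∀ k : Nat, k < o.length → ∀ c ∈ cs.getD (o.getD k 0).toNat [], ∃ j : Nat, k < j ∧ j < o.length ∧ o.getD j 0 = c) →
      ChildrenLater cs o := by
  intro o
  induction o with
  | nil => intro _; trivial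
  | cons v s ih =>
      intro h
      constructor
      · intro c hc
        obtain ⟨j, hj1, hj2, hj3⟩ := h 0 (by simp) c (by simpa using hc)
        obtain ⟨j', rfl⟩ : ∃ j', j = j' + 1 := ⟨j - 1, by omega⟩
        have hj2' : j' < s.length := by simpa using hj2
        have : s.getD j' 0 = c := by simpa using hj3
        exact this ▸ pv_getD_mem s j' hj2' 0
      · refine ih ?_
        intro k hk c hc
        obtain ⟨j, hj1, hj2, hj3⟩ := h (k+1) (by simpa using hk) c (by simpa using hc)
        obtain ⟨j', rfl⟩ : ∃ j', j = j' + 1 := ⟨j - 1, by omega⟩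
        exact ⟨j', by omega, by simpa using hj2, by simpa using hj3⟩

theorem CL_mem {cs : List (List Int)} :
    ∀ {s : List Int}, ChildrenLater cs s → ∀ {w : Int}, w ∈ s → ∀ c ∈ cs.getD w.toNat [], c ∈ s := by
  intro s
  induction s with
  | nil => intro _ w hw; simp at hw
  | cons v s ih =>
      intro h w hw c hc
      rcases List.mem_cons.1 hw with rfl | hw
      · exact List.mem_cons_of_mem _ (h.1 c hc)
      · exact List.mem_cons_of_mem _ (ih h.2 hw c hc)

-- the local DP equations B's sweep establishes
def RecAt (A : List Int) (cs : List (List Int)) (st : List Int × List Int) (v : Int) : Prop :=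
  if cs.getD v.toNat [] ≠ [] then
    st.1.getD v.toNat 0 = pyMax ((cs.getD v.toNat []).map (fun c => A.getD v.toNat 0 - A.getD c.toNat 0 + st.2.getD c.toNat 0)) ∧
    st.2.getD v.toNat 0 = pyMax ((cs.getD v.toNat []).map (fun c => st.1.getD c.toNat 0))
  else
    st.1.getD v.toNat 0 = A.getD v.toNat 0 ∧ st.2.getD v.toNat 0 = 0

theorem sweep_ok {n : Nat} {A : List Int} {cs : List (List Int)} :
    ∀ (s : List Int) (st : List Int × List Int),
      s.Nodup → (∀ v ∈ s, 0 ≤ v ∧ v.toNat < n) → ChildrenLater cs s →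
      st.1.length = n → st.2.length = n →
      ((s.foldr (fun v acc => sweepStep A cs acc v) st).1.length = n ∧
       (s.foldr (fun v acc => sweepStep A cs acc v) st).2.length = n) ∧
      (∀ j : Nat, (∀ v ∈ s, v.toNat ≠ j) →
        (s.foldr (fun v acc => sweepStep A cs acc v) st).1.getD j 0 = st.1.getD j 0 ∧
        (s.foldr (fun v acc => sweepStep A cs acc v) st).2.getD j 0 = st.2.getD j 0) ∧
      (∀ v ∈ s, RecAt A cs (s.foldr (fun v acc => sweepStep A cs acc v) st) v) := by
  intro s
  induction s with
  | nil => intro st _ _ _ h1 h2; exact ⟨⟨h1, h2⟩, fun j _ => ⟨rfl, rfl⟩, fun v hv => absurd hv (by simp)⟩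
  | cons v s ih =>
      intro st hnd hval hcl h1 h2
      obtain ⟨hvnotin, hsnd⟩ := List.nodup_cons.1 hnd
      have hv0 : 0 ≤ v := (hval v (by simp)).1
      have hvn : v.toNat < n := (hval v (by simp)).2
      obtain ⟨⟨l1, l2⟩, hunch, hrec⟩ := ih st hsnd (fun w hw => hval w (by simp [hw])) hcl.2 h1 h2
      set st1 := s.foldr (fun v acc => sweepStep A cs acc v) st with hst1
      have hchS : ∀ c ∈ cs.getD v.toNat [], c ∈ s := hcl.1
      have hchne : ∀ c ∈ cs.getD v.toNat [], c.toNat ≠ v.toNat := by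
        intro c hc
        have hcs := hchS c hc
        have hc0 : 0 ≤ c := (hval c (by simp [hcs])).1
        intro hcn
        have : c = v := by omega
        exact hvnotin (this ▸ hcs)
      have hSne : ∀ w ∈ s, w.toNat ≠ v.toNat := by
        intro w hw
        have hw0 : 0 ≤ w := (hval w (by simp [hw])).1
        intro hwe
        have : w = v := by omega
        exact hvnotin (this ▸ hw)
      simp only [List.foldr_cons]
      have hstep_ne : ∀ j : Nat, j ≠ v.toNat →
          (sweepStep A cs st1 v).1.getD j 0 = st1.1.getD j 0 ∧
          (sweepStep A cs st1 v).2.getD j 0 = st1.2.getD j 0 := by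
        intro j hj
        unfold sweepStep
        simp only []
        split <;> exact ⟨pv_getD_set_ne _ _ _ hj _ _, pv_getD_set_ne _ _ _ hj _ _⟩
      have hstep_len : (sweepStep A cs st1 v).1.length = n ∧ (sweepStep A cs st1 v).2.length = n := by
        unfold sweepStep
        simp only []
        split <;> simp [l1, l2]
      refine ⟨hstep_len, ?_, ?_⟩
      · intro j hj
        have hjv : v.toNat ≠ j := hj v (by simp)
        obtain ⟨u1, u2⟩ := hunch j (fun w hw => hj w (by simp [hw]))
        obtain ⟨e1, e2⟩ := hstep_ne j (Ne.symm hjv)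
        exact ⟨e1.trans u1, e2.trans u2⟩
      · intro w hw
        rcases List.mem_cons.1 hw with heq | hw
        · -- RecAt at the freshly processed node
          subst heq
          by_cases hne : cs.getD w.toNat [] ≠ []
          · rw [RecAt, if_pos hne]
            rw [sweepStep, if_pos hne]
            simp only []
            constructor
            · rw [pv_getD_set_self _ _ (by rw [← hst1, l1]; exact hvn) _ _]
              congr 1
              refine List.map_congr_left ?_
              intro c hc
              rw [pv_getD_set_ne _ _ _ (hchne c hc) _ _]
            · rw [pv_getD_set_self _ _ (by rw [← hst1, l2]; exact hvn) _ _]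
          · rw [RecAt, if_neg hne]
            rw [sweepStep, if_neg hne]
            exact ⟨pv_getD_set_self _ _ (by rw [← hst1, l1]; exact hvn) _ _,
                   pv_getD_set_self _ _ (by rw [← hst1, l2]; exact hvn) _ _⟩
        · -- earlier-established equations survive: all their positions differ from v.toNat
          have hrw := hrec w hw
          have hwv : w.toNat ≠ v.toNat := hSne w hw
          have hcw : ∀ c ∈ cs.getD w.toNat [], c.toNat ≠ v.toNat := by
            intro c hc
            exact hSne c (CL_mem hcl.2 hw c hc)
          by_cases hne : cs.getD w.toNat [] ≠ []
          · rw [RecAt, if_pos hne] at hrw ⊢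
            constructor
            · rw [(hstep_ne _ hwv).1, hrw.1]
              congr 1
              exact List.map_congr_left fun c hc => by rw [(hstep_ne _ (hcw c hc)).2]
            · rw [(hstep_ne _ hwv).2, hrw.2]
              congr 1
              exact List.map_congr_left fun c hc => by rw [(hstep_ne _ (hcw c hc)).1]
          · rw [RecAt, if_neg hne] at hrw ⊢
            exact ⟨(hstep_ne _ hwv).1.trans hrw.1, (hstep_ne _ hwv).2.trans hrw.2⟩

theorem DescR_trans {cs : List (List Int)} {a v j : Nat}
    (h1 : DescR cs a v) (h2 : DescR cs v j) : DescR cs a j := by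
  induction h2 with
  | refl => exact h1
  | step c hd hc ih => exact DescR.step c ih hc

theorem DescR_decomp {cs : List (List Int)} {ix j : Nat} (h : DescR cs ix j) :
    j = ix ∨ ∃ c ∈ cs.getD ix [], DescR cs c.toNat j := by
  induction h with
  | refl => exact Or.inl rfl
  | step c hd hc ih =>
      rcases ih with rfl | ⟨c', hc', hd'⟩
      · exact Or.inr ⟨c, hc, DescR.refl _⟩
      · exact Or.inr ⟨c', hc', DescR.step c hd' hc⟩

theorem solveA_fold {n : Nat} {A : List Int} {cs : List (List Int)} {o : List Int}
    {B : List Int × List Int} (f : Nat)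
    (IH : ∀ (ix : Nat) (st : List Int × List Int) (p : Nat),
      p < o.length → o.getD p 0 = (ix : Int) → o.length - p ≤ f →
      st.1.length = n → st.2.length = n →
      ((solveA A cs f ix st).1.length = n ∧ (solveA A cs f ix st).2.length = n) ∧
      (∀ j : Nat, ¬ DescR cs ix j →
        (solveA A cs f ix st).1.getD j 0 = st.1.getD j 0 ∧
        (solveA A cs f ix st).2.getD j 0 = st.2.getD j 0) ∧
      (∀ j : Nat, DescR cs ix j →
        (solveA A cs f ix st).1.getD j 0 = B.1.getD j 0 ∧
        (solveA A cs f ix st).2.getD j 0 = B.2.getD j 0))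
    (hval : ∀ v ∈ o, 0 ≤ v ∧ v.toNat < n) :
    ∀ (l : List Int) (st : List Int × List Int) (p : Nat),
      p < o.length → o.length - p ≤ f + 1 →
      (∀ c ∈ l, ∃ q : Nat, p < q ∧ q < o.length ∧ o.getD q 0 = c) →
      st.1.length = n → st.2.length = n →
      ((l.foldl (fun s c => solveA A cs f c.toNat s) st).1.length = n ∧
       (l.foldl (fun s c => solveA A cs f c.toNat s) st).2.length = n) ∧
      (∀ j : Nat, (∀ c ∈ l, ¬ DescR cs c.toNat j) →
        (l.foldl (fun s c => solveA A cs f c.toNat s) st).1.getD j 0 = st.1.getD j 0 ∧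
        (l.foldl (fun s c => solveA A cs f c.toNat s) st).2.getD j 0 = st.2.getD j 0) ∧
      (∀ j : Nat, (∃ c ∈ l, DescR cs c.toNat j) →
        (l.foldl (fun s c => solveA A cs f c.toNat s) st).1.getD j 0 = B.1.getD j 0 ∧
        (l.foldl (fun s c => solveA A cs f c.toNat s) st).2.getD j 0 = B.2.getD j 0) := by
  intro l
  induction l with
  | nil =>
      intro st p hp hf hq h1 h2
      exact ⟨⟨h1, h2⟩, fun j _ => ⟨rfl, rfl⟩, fun j hj => by simp at hj⟩
  | cons c l ihl =>
      intro st p hp hf hq h1 h2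
      obtain ⟨q, hq1, hq2, hq3⟩ := hq c (by simp)
      have hcmem : c ∈ o := hq3 ▸ pv_getD_mem o q hq2 0
      have hc0 : 0 ≤ c := (hval c hcmem).1
      have hq3' : o.getD q 0 = (c.toNat : Int) := by rw [hq3]; omega
      obtain ⟨⟨k1, k2⟩, kunch, kdesc⟩ :=
        IH c.toNat st q hq2 hq3' (by omega) h1 h2
      set st1 := solveA A cs f c.toNat st with hst1
      obtain ⟨⟨m1, m2⟩, munch, mdesc⟩ :=
        ihl st1 p hp hf (fun c' hc' => hq c' (by simp [hc'])) k1 k2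
      simp only [List.foldl_cons]
      rw [← hst1]
      refine ⟨⟨m1, m2⟩, ?_, ?_⟩
      · intro j hj
        obtain ⟨u1, u2⟩ := munch j (fun c' hc' => hj c' (by simp [hc']))
        obtain ⟨w1, w2⟩ := kunch j (hj c (by simp))
        exact ⟨u1.trans w1, u2.trans w2⟩
      · intro j hj
        by_cases hdc : DescR cs c.toNat j
        · have hB := kdesc j hdc
          by_cases hex : ∃ c' ∈ l, DescR cs c'.toNat j
          · exact mdesc j hex
          · rw [not_exists] at hex
            simp only [not_and] at hex
            obtain ⟨u1, u2⟩ := munch j hex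
            exact ⟨u1.trans hB.1, u2.trans hB.2⟩
        · obtain ⟨c', hc', hdc'⟩ := hj
          rcases List.mem_cons.1 hc' with heq | hc'
          · exact absurd (heq ▸ hdc') hdc
          · exact mdesc j ⟨c', hc', hdc'⟩

theorem solveA_ok {n : Nat} {A : List Int} {cs : List (List Int)} {o : List Int}
    {B : List Int × List Int}
    (hnd : o.Nodup)
    (hval : ∀ v ∈ o, 0 ≤ v ∧ v.toNat < n)
    (hpos : ∀ k : Nat, k < o.length → ∀ c ∈ cs.getD (o.getD k 0).toNat [], ∃ j : Nat, k < j ∧ j < o.length ∧ o.getD j 0 = c)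
    (hrec : ∀ v ∈ o, RecAt A cs B v) :
    ∀ (f : Nat) (ix : Nat) (st : List Int × List Int) (p : Nat),
      p < o.length → o.getD p 0 = (ix : Int) → o.length - p ≤ f →
      st.1.length = n → st.2.length = n →
      ((solveA A cs f ix st).1.length = n ∧ (solveA A cs f ix st).2.length = n) ∧
      (∀ j : Nat, ¬ DescR cs ix j →
        (solveA A cs f ix st).1.getD j 0 = st.1.getD j 0 ∧
        (solveA A cs f ix st).2.getD j 0 = st.2.getD j 0) ∧
      (∀ j : Nat, DescR cs ix j →
        (solveA A cs f ix st).1.getD j 0 = B.1.getD j 0 ∧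
        (solveA A cs f ix st).2.getD j 0 = B.2.getD j 0) := by
  intro f
  induction f with
  | zero =>
      intro ix st p hp _ hf _ _
      omega
  | succ f ihf =>
      intro ix st p hp hpix hf h1 h2
      have hvmem : o.getD p 0 ∈ o := pv_getD_mem o p hp 0
      have hixn : ix < n := by
        have := (hval _ hvmem).2
        rwa [hpix] at this
      have hixv : (o.getD p 0).toNat = ix := by rw [hpix]; simp
      have hRec := hrec _ hvmem
      rw [RecAt, hixv] at hRec
      by_cases hch : cs.getD ix [] ≠ []
      · have hqs : ∀ c ∈ cs.getD ix [], ∃ q : Nat, p < q ∧ q < o.length ∧ o.getD q 0 = c := by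
          intro c hc
          exact hpos p hp c (by rwa [hixv])
        obtain ⟨⟨m1, m2⟩, munch, mdesc⟩ :=
          solveA_fold f ihf hval (cs.getD ix []) st p hp (by omega) hqs h1 h2
        rw [if_pos hch] at hRec
        rw [solveA, if_pos hch]
        simp only []
        set st1 := (cs.getD ix []).foldl (fun s c => solveA A cs f c.toNat s) st with hst1
        have hcvals := fun (c : Int) (hc : c ∈ cs.getD ix []) =>
          mdesc c.toNat ⟨c, hc, DescR.refl _⟩
        have hcnei : ∀ c ∈ cs.getD ix [], c.toNat ≠ ix := by
          intro c hc hceq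
          obtain ⟨q, hq1, hq2, hq3⟩ := hqs c hc
          have hc0 : 0 ≤ c := (hval c (hq3 ▸ pv_getD_mem o q hq2 0)).1
          have : o.getD q 0 = o.getD p 0 := by rw [hq3, hpix]; omega
          exact absurd (pv_nodup_getD_inj hnd hq2 hp this) (by omega)
        set M1 := pyMax ((cs.getD ix []).map (fun c => A.getD ix 0 - A.getD c.toNat 0 + st1.2.getD c.toNat 0)) with hM1
        set dp2 := st1.1.set ix M1 with hdp2
        set M2 := pyMax ((cs.getD ix []).map (fun c => dp2.getD c.toNat 0)) with hM2
        set cm2 := st1.2.set ix M2 with hcm2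
        have hdpval : dp2.getD ix 0 = B.1.getD ix 0 := by
          rw [hdp2, pv_getD_set_self _ _ (by rw [m1]; exact hixn) _ _, hM1, hRec.1]
          congr 1
          exact List.map_congr_left fun c hc => by rw [(hcvals c hc).2]
        have hcmval : cm2.getD ix 0 = B.2.getD ix 0 := by
          rw [hcm2, pv_getD_set_self _ _ (by rw [m2]; exact hixn) _ _, hM2, hRec.2]
          congr 1
          refine List.map_congr_left fun c hc => ?_
          rw [hdp2, pv_getD_set_ne _ _ _ (hcnei c hc) _ _, (hcvals c hc).1]
        refine ⟨⟨by rw [hdp2]; simpa using m1, by rw [hcm2]; simpa using m2⟩, ?_, ?_⟩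
        · intro j hjd
          have hjix : j ≠ ix := fun h => hjd (by rw [h]; exact DescR.refl ix)
          have hnone : ∀ c ∈ cs.getD ix [], ¬ DescR cs c.toNat j := by
            intro c hc hdc
            exact hjd (DescR_trans (DescR.step c (DescR.refl ix) hc) hdc)
          obtain ⟨u1, u2⟩ := munch j hnone
          exact ⟨by rw [hdp2, pv_getD_set_ne _ _ _ hjix _ _]; exact u1,
                 by rw [hcm2, pv_getD_set_ne _ _ _ hjix _ _]; exact u2⟩
        · intro j hjd
          by_cases hjix : j = ix
          · subst hjix
            exact ⟨hdpval, hcmval⟩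
          · rcases DescR_decomp hjd with heq2 | ⟨c, hc, hdc⟩
            · exact absurd heq2 hjix
            · obtain ⟨u1, u2⟩ := mdesc j ⟨c, hc, hdc⟩
              exact ⟨by rw [hdp2, pv_getD_set_ne _ _ _ hjix _ _]; exact u1,
                     by rw [hcm2, pv_getD_set_ne _ _ _ hjix _ _]; exact u2⟩
      · rw [if_neg hch] at hRec
        rw [solveA, if_neg hch]
        refine ⟨⟨by simpa using h1, by simpa using h2⟩, ?_, ?_⟩
        · intro j hjd
          have hjix : j ≠ ix := fun h => hjd (by rw [h]; exact DescR.refl ix)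
          exact ⟨pv_getD_set_ne _ _ _ hjix _ _, pv_getD_set_ne _ _ _ hjix _ _⟩
        · intro j hjd
          rcases DescR_decomp hjd with heq2 | ⟨c, hc, _⟩
          · subst heq2
            exact ⟨by rw [pv_getD_set_self _ _ (by rw [h1]; exact hixn) _ _]; exact hRec.1.symm,
                   by rw [pv_getD_set_self _ _ (by rw [h2]; exact hixn) _ _]; exact hRec.2.symm⟩
          · rw [not_not.1 hch] at hc
            simp at hc

-- ===== VERDICT (by name: the statement is the Claim_ definition above) =====
theorem bestNode_spec : Claim_equal_bestNode := by
  unfold Claim_equal_bestNode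
  intro N A P _ hpre
  unfold Spec_bestNode
  obtain ⟨hN, hA, hPb⟩ := hpre
  set n := N.toNat with hn
  have hn1 : 1 ≤ n := by omega
  have hcs := buildCs_inv (P := P) hN
  set cs := buildCs N P with hcsdef
  obtain ⟨clen, cbnd, cnd, cdisj⟩ := hcs
  have cval : ∀ p : Nat, ∀ c ∈ cs.getD p [], 1 ≤ c ∧ c.toNat < n := by
    intro p c hc
    have := cbnd p c hc
    exact ⟨this.1, by omega⟩
  have hinv0 : BfsInv n cs 0 [0] := by
    refine ⟨by simp, by simp, by simp, by simp, ?_, ?_⟩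
    · intro v hv
      simp at hv
      subst hv
      exact ⟨le_refl 0, by omega, DescR.refl 0, Or.inl rfl⟩
    · intro k hk
      exact absurd hk (by omega)
  obtain ⟨hinvL, hLn⟩ := bfs_run cval cnd cdisj n 0 [0] hinv0 (by omega)
  set o := bfsLoop cs n 0 [0] with ho
  obtain ⟨hiL, ond, one, o0, omem, opos⟩ := hinvL
  have hCL : ChildrenLater cs o := posCL o opos
  have oval : ∀ v ∈ o, 0 ≤ v ∧ v.toNat < n := fun v hv => ⟨(omem v hv).1, (omem v hv).2.1⟩
  obtain ⟨⟨b1, b2⟩, bunch, brec⟩ :=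
    sweep_ok (n := n) (A := A) (cs := cs) o (List.replicate n 0, List.replicate n 0)
      ond oval hCL (by simp) (by simp)
  set Bst := o.foldr (fun v acc => sweepStep A cs acc v) (List.replicate n 0, List.replicate n 0) with hBst
  have h0pos : (0:Nat) < o.length := by
    cases ho' : o with
    | nil => exact absurd ho' one
    | cons x xs => simp
  obtain ⟨⟨a1, a2⟩, aunch, adesc⟩ :=
    solveA_ok ond oval opos brec n 0 (List.replicate n 0, List.replicate n 0) 0
      h0pos (by simpa using o0) (by omega) (by simp) (by simp)
  set Ast := solveA A cs n 0 (List.replicate n 0, List.replicate n 0) with hAst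
  have hnotino : ∀ j : Nat, ¬ DescR cs 0 j → ∀ v ∈ o, v.toNat ≠ j := by
    intro j hj v hv hvj
    exact hj (hvj ▸ (omem v hv).2.2.1)
  have hdp_eq : ∀ j : Nat, Ast.1.getD j 0 = Bst.1.getD j 0 := by
    intro j
    by_cases hd : DescR cs 0 j
    · exact (adesc j hd).1
    · rw [(aunch j hd).1, (bunch j (hnotino j hd)).1]
  have hlist : Ast.1 = Bst.1 := by
    apply List.ext_getElem (by rw [a1, b1])
    intro i h1i h2i
    have hh := hdp_eq i
    rwa [List.getD_eq_getElem _ _ h1i, List.getD_eq_getElem _ _ h2i] at hh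
  show bestNode N A P = bestNode_alt N A P
  unfold bestNode bestNode_alt
  simp only []
  rw [← hcsdef, ← hn, ← ho, List.foldl_reverse]
  rw [← hAst]
  rw [show o.foldr (fun y x => sweepStep A cs x y) (List.replicate n 0, List.replicate n 0) = Bst from rfl]
  rw [hlist]
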